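-- pv_equiv track=rewrite | github.com/enricotomasi/GeeksforGeeks_problems | Easy/Regular polygon-1.py | isPolygonPossible
-- ===== SOURCE A (Python) =====
-- def isPolygonPossible(arr, N) :
--     #code here
--     if N < 3:
--         return -1
--
--     for i in range(1, (N // 3)+1):
--         for j in range(N):
--             if arr[j] == 1:
--                 temp = j
--                 while temp < j + N:
--                     if arr[temp % N] != 1:
--                         break
--                     temp += i
--                 if temp == j + N:
--                     return 1
--
--     return -1
-- ===== SOURCE B (Python) =====
-- def isPolygonPossible(arr, N):
--     # Only divisors i of N (i <= N//3) can close the cycle; check each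
--     # residue class r mod i with a direct stride scan (no modular walk).
--     if N < 3:
--         return -1
--     for i in range(1, N // 3 + 1):
--         if N % i == 0:
--             for r in range(i):
--                 if all(arr[r + k * i] == 1 for k in range(N // i)):
--                     return 1
--     return -1
-- ===== Notes on version B (the rewrite author's own statement) =====
-- stated objective: faster
-- what changed: B iterates only the divisors i of N (i <= N//3) and scans each residue class r mod i once with a direct stride walk, instead of A's restarting a full modular walk of length N from every starting index j for every step size i.
import Mathlib
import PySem

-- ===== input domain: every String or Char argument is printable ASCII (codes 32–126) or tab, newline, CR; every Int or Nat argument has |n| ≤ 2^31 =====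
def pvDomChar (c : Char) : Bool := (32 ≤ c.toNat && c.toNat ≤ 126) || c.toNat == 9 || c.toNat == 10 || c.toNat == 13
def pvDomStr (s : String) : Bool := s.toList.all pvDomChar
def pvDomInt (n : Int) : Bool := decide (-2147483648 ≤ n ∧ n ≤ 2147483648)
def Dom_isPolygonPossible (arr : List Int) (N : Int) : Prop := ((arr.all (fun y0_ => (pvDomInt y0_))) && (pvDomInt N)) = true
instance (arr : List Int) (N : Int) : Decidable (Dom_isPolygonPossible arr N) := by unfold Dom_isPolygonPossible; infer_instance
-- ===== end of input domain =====

-- B iterates only the divisors i of N and scans each residue class once (faster in a timing run),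
-- instead of A's restarting a modular walk from every index j for every step size i.

-- ===== PORT A =====
-- A's inner 'while temp < j + N: … temp += i' loop; fuel N.toNat+1 is enough since i ≥ 1
def pvWhileA (arr : List Int) (N j i : Int) : Int → Nat → Int
  | temp, 0 => temp
  | temp, fuel+1 =>
    if temp < j + N then
      if PySem.List.pyGetD arr (PySem.Int.mod temp N) 0 ≠ 1 then temp
      else pvWhileA arr N j i (temp + i) fuel
    else temp

def isPolygonPossible (arr : List Int) (N : Int) : Int :=
  if N < 3 then -1
  else
    match (PySem.List.pyRange 1 (PySem.Int.floordiv N 3 + 1) 1).findSome? (fun i =>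
      (PySem.List.pyRange 0 N 1).findSome? (fun j =>
        if PySem.List.pyGetD arr j 0 = 1 then
          (if pvWhileA arr N j i j (N.toNat+1) = j + N then some (1:Int) else none)
        else none)) with
    | some v => v
    | none => -1

-- ===== PORT B =====
-- all(arr[r + k*i] == 1 for k in range(N // i))
def pvAllOnesB (arr : List Int) (N i r : Int) : Bool :=
  (PySem.List.pyRange 0 (PySem.Int.floordiv N i) 1).all
    (fun k => PySem.List.pyGetD arr (r + k * i) 0 == 1)

def isPolygonPossible_alt (arr : List Int) (N : Int) : Int :=
  if N < 3 then -1
  else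
    match (PySem.List.pyRange 1 (PySem.Int.floordiv N 3 + 1) 1).findSome? (fun i =>
      if PySem.Int.mod N i = 0 then
        (PySem.List.pyRange 0 i 1).findSome? (fun r =>
          if pvAllOnesB arr N i r then some (1:Int) else none)
      else none) with
    | some v => v
    | none => -1

-- ===== PRECONDITION & SPEC =====
-- Pre_ excludes only inputs where A raises IndexError: 3 ≤ N but the list is shorter than N.
def Pre_isPolygonPossible (arr : List Int) (N : Int) : Prop := N < 3 ∨ N ≤ (arr.length : Int)
instance (arr : List Int) (N : Int) : Decidable (Pre_isPolygonPossible arr N) := by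
  unfold Pre_isPolygonPossible; infer_instance
def pvWitness_isPolygonPossible : List Int × Int := ([1, 1, 1, 1], 4)

def Spec_isPolygonPossible (arr : List Int) (N : Int) (out : Int) : Prop := out = isPolygonPossible_alt arr N
instance (arr : List Int) (N : Int) (out : Int) : Decidable (Spec_isPolygonPossible arr N out) := by unfold Spec_isPolygonPossible; infer_instance

-- ===== CLAIM (what is proved, stated in full; the proofs are below) =====
def Claim_equal_isPolygonPossible : Prop := ∀ (arr : List Int) (N : Int), Dom_isPolygonPossible arr N → Pre_isPolygonPossible arr N → Spec_isPolygonPossible arr N (isPolygonPossible arr N)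

-- ===== LEMMAS AND PROOFS =====

-- findSome? of two {none, some 1}-valued functions agreeing on success
theorem pvFindSome_congr {α : Type} (l : List α) (f g : α → Option Int)
    (hf : ∀ x ∈ l, f x = none ∨ f x = some 1)
    (hg : ∀ x ∈ l, g x = none ∨ g x = some 1)
    (h : ∀ x ∈ l, (f x = some 1 ↔ g x = some 1)) :
    l.findSome? f = l.findSome? g := by
  induction l with
  | nil => rfl
  | cons a l ih =>
    simp only [List.findSome?_cons]
    have hfa := hf a (by simp)
    have hga := hg a (by simp)
    have hia := h a (by simp)
    rcases hfa with hfa | hfa <;> rcases hga with hga | hga <;>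
      simp_all [ih (fun x hx => hf x (by simp [hx])) (fun x hx => hg x (by simp [hx]))
        (fun x hx => h x (by simp [hx]))]

theorem pvFindSome_some_one {α : Type} (l : List α) (f : α → Option Int)
    (hf : ∀ x ∈ l, f x = none ∨ f x = some 1) :
    (l.findSome? f = some 1 ↔ ∃ x ∈ l, f x = some 1) := by
  induction l with
  | nil => simp
  | cons a l ih =>
    simp only [List.findSome?_cons]
    rcases hf a (by simp) with hfa | hfa
    · simp_all [ih (fun x hx => hf x (by simp [hx]))]
    · simp_all

theorem pvFindSome_vals {α : Type} (l : List α) (f : α → Option Int)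
    (hf : ∀ x ∈ l, f x = none ∨ f x = some 1) :
    l.findSome? f = none ∨ l.findSome? f = some 1 := by
  induction l with
  | nil => simp
  | cons a l ih =>
    simp only [List.findSome?_cons]
    rcases hf a (by simp) with hfa | hfa <;>
      simp_all [ih (fun x hx => hf x (by simp [hx]))]

-- characterization of A's while loop (i ≥ 1, enough fuel)
theorem pvWhileA_char (arr : List Int) (N j i : Int) (hi : 1 ≤ i) :
    ∀ (fuel : Nat) (temp : Int), (j + N - temp).toNat < fuel →
      (pvWhileA arr N j i temp fuel = j + N ↔
        ((∀ k : Nat, temp + k * i < j + N → PySem.List.pyGetD arr (PySem.Int.mod (temp + k * i) N) 0 = 1) ∧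
         (∃ m : Nat, temp + m * i = j + N))) := by
  intro fuel
  induction fuel with
  | zero => intro temp h; omega
  | succ f ih =>
    intro temp h
    rw [pvWhileA]
    by_cases hlt : temp < j + N
    · simp only [hlt, if_true]
      by_cases hv : PySem.List.pyGetD arr (PySem.Int.mod temp N) 0 ≠ 1
      · rw [if_pos hv]
        constructor
        · intro he; omega
        · rintro ⟨hall, -⟩
          exact absurd (by simpa using hall 0 (by simpa using hlt)) hv
      · rw [if_neg hv]
        push Not at hv
        have hrec := ih (temp + i) (by omega)
        rw [hrec]
        constructor
        · rintro ⟨hall, m, hm⟩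
          refine ⟨?_, m + 1, ?_⟩
          · intro k hk
            cases k with
            | zero => simpa using hv
            | succ k' =>
              have := hall k' (by push_cast at hk ⊢; linarith)
              convert this using 3 <;> · push_cast; ring
          · push_cast at hm ⊢; linarith
        · rintro ⟨hall, m, hm⟩
          refine ⟨?_, ?_⟩
          · intro k hk
            have := hall (k + 1) (by push_cast at hk ⊢; linarith)
            convert this using 3 <;> · push_cast; ring
          · cases m with
            | zero => simp at hm; omega
            | succ m' =>
              exact ⟨m', by push_cast at hm ⊢; linarith⟩
    · simp only [hlt, if_false]
      constructor
      · intro he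
        subst he
        refine ⟨?_, 0, by simp⟩
        intro k hk
        have : (0:Int) ≤ (k:Int) * i := by positivity
        omega
      · rintro ⟨-, m, hm⟩
        have : (0:Int) ≤ (m:Int) * i := by positivity
        omega

-- unfolded form of pvAllOnesB
theorem pvAllOnesB_iff (arr : List Int) (N i r : Int) (hi : 0 < i) :
    (pvAllOnesB arr N i r = true ↔
      ∀ k : Int, 0 ≤ k → k < N / i → PySem.List.pyGetD arr (r + k * i) 0 = 1) := by
  unfold pvAllOnesB
  rw [PySem.Int.floordiv_eq_ediv_of_pos hi]
  simp [List.all_eq_true, PySem.List.mem_pyRange_one]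

-- the core equivalence between A's successful walks and B's residue-class scans
theorem pvKey (arr : List Int) (N i : Int) (hN : 3 ≤ N) (hlen : N ≤ (arr.length : Int))
    (hi1 : 1 ≤ i) (hi3 : i * 3 ≤ N) :
    ((∃ j : Int, (0 ≤ j ∧ j < N) ∧ PySem.List.pyGetD arr j 0 = 1 ∧
        ((∀ k : Nat, j + k * i < j + N → PySem.List.pyGetD arr (PySem.Int.mod (j + k * i) N) 0 = 1) ∧
         (∃ m : Nat, j + m * i = j + N)))
      ↔ (PySem.Int.mod N i = 0 ∧ ∃ r : Int, (0 ≤ r ∧ r < i) ∧ pvAllOnesB arr N i r = true)) := by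
  have hi0 : (0:Int) < i := by omega
  constructor
  · rintro ⟨j, ⟨hj0, hjN⟩, hj1, hall, m, hm⟩
    have hmN : (m : Int) * i = N := by linarith [hm]
    have hdvd : i ∣ N := ⟨m, by rw [← hmN]; ring⟩
    have hmod : PySem.Int.mod N i = 0 := by
      rw [PySem.Int.mod_eq_emod_of_pos hi0]
      exact Int.emod_eq_zero_of_dvd hdvd
    have hm0 : (0:Int) < (m:Int) := by nlinarith
    refine ⟨hmod, j % i, ⟨Int.emod_nonneg j (by omega), Int.emod_lt_of_pos j hi0⟩, ?_⟩
    rw [pvAllOnesB_iff arr N i _ hi0]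
    have hNi : N / i = (m : Int) := by
      rw [← hmN]; exact Int.mul_ediv_cancel _ (by omega)
    rw [hNi]
    intro k hk0 hkm
    set r := j % i with hr
    have hrj : i * (j / i) + r = j := Int.mul_ediv_add_emod j i
    set q := j / i with hq
    have hq0 : 0 ≤ q := Int.ediv_nonneg hj0 (by omega)
    have hr0 : 0 ≤ r := Int.emod_nonneg j (by omega)
    have hri : r < i := Int.emod_lt_of_pos j hi0
    have hqm : q < (m:Int) := by nlinarith
    -- choose kk ≡ k - q (mod m), 0 ≤ kk < m
    set kk : Int := (k - q) % (m:Int) with hkk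
    have hkk0 : 0 ≤ kk := Int.emod_nonneg _ (by omega)
    have hkkm : kk < (m:Int) := Int.emod_lt_of_pos _ hm0
    have hstep : kk.toNat * i < N := by
      have : (kk.toNat : Int) = kk := Int.toNat_of_nonneg hkk0
      nlinarith [this]
    have happ := hall kk.toNat (by omega)
    rw [Int.toNat_of_nonneg hkk0] at happ
    have hidx : PySem.Int.mod (j + kk * i) N = r + k * i := by
      rw [PySem.Int.mod_eq_emod_of_pos (by omega : (0:Int) < N)]
      -- j + kk*i = r + (q + kk)*i  and  q + kk ≡ k (mod m)
      have hdm : (m:Int) * ((k - q) / (m:Int)) + (k - q) % (m:Int) = k - q :=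
        Int.mul_ediv_add_emod _ _
      obtain ⟨t, ht⟩ : ∃ t : Int, q + kk - k = (m:Int) * t :=
        ⟨-((k - q) / (m:Int)), by linear_combination hdm⟩
      have hval : j + kk * i = r + k * i + t * N := by
        have hqk : q + kk = k + t * (m:Int) := by linear_combination ht
        calc j + kk * i = r + (q + kk) * i := by rw [← hrj]; ring
          _ = r + (k + t * (m:Int)) * i := by rw [hqk]
          _ = r + k * i + t * ((m:Int) * i) := by ring
          _ = r + k * i + t * N := by rw [hmN]
      have hval2 : r + k * i + t * N = r + k * i + N * t := by ring
      rw [hval, hval2]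
      have hbound : 0 ≤ r + k * i ∧ r + k * i < N := by
        constructor
        · nlinarith
        · nlinarith
      rw [Int.add_mul_emod_self_left]
      exact Int.emod_eq_of_lt hbound.1 hbound.2
    rw [hidx] at happ
    exact happ
  · rintro ⟨hmod, r, ⟨hr0, hri⟩, hones⟩
    have hdvd : i ∣ N := by
      rw [PySem.Int.mod_eq_emod_of_pos hi0] at hmod
      exact Int.dvd_of_emod_eq_zero hmod
    have hNi : N / i * i = N := Int.ediv_mul_cancel hdvd
    set m := N / i with hm
    have hm3 : 3 ≤ m := by nlinarith
    rw [pvAllOnesB_iff arr N i r hi0, ← hm] at hones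
    have harr : PySem.List.pyGetD arr r 0 = 1 := by
      have := hones 0 le_rfl (by omega)
      simpa using this
    refine ⟨r, ⟨hr0, by omega⟩, harr, ?_, m.toNat, ?_⟩
    · intro k hk
      have hki : (k:Int) * i < N := by omega
      have hkm : (k:Int) < m := by nlinarith
      have hbound : 0 ≤ r + (k:Int) * i ∧ r + (k:Int) * i < N := by
        constructor
        · positivity
        · nlinarith
      have hidx : PySem.Int.mod (r + (k:Int) * i) N = r + (k:Int) * i := by
        rw [PySem.Int.mod_eq_emod_of_pos (by omega : (0:Int) < N)]
        exact Int.emod_eq_of_lt hbound.1 hbound.2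
      rw [hidx]
      exact hones (k:Int) (by positivity) hkm
    · have hmt : ((m.toNat : Int)) = m := Int.toNat_of_nonneg (by omega)
      nlinarith [hmt]

-- per step size i, A's inner j-scan succeeds iff B's divisor test + residue scan succeeds
theorem pvPerI (arr : List Int) (N i : Int) (hN : 3 ≤ N) (hlen : N ≤ (arr.length : Int))
    (hi1 : 1 ≤ i) (hi3 : i * 3 ≤ N) :
    (((PySem.List.pyRange 0 N 1).findSome? (fun j =>
        if PySem.List.pyGetD arr j 0 = 1 then
          (if pvWhileA arr N j i j (N.toNat+1) = j + N then some (1:Int) else none)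
        else none)) = some 1
      ↔ (if PySem.Int.mod N i = 0 then
          (PySem.List.pyRange 0 i 1).findSome? (fun r =>
            if pvAllOnesB arr N i r then some (1:Int) else none)
        else none) = some 1) := by
  have hvalA : ∀ j ∈ PySem.List.pyRange 0 N 1,
      ((if PySem.List.pyGetD arr j 0 = 1 then
        (if pvWhileA arr N j i j (N.toNat+1) = j + N then some (1:Int) else none)
      else none) = none ∨
      (if PySem.List.pyGetD arr j 0 = 1 then
        (if pvWhileA arr N j i j (N.toNat+1) = j + N then some (1:Int) else none)
      else none) = some 1) := by
    intro j _; split_ifs <;> simp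
  rw [pvFindSome_some_one _ _ hvalA]
  have hA : (∃ j ∈ PySem.List.pyRange 0 N 1,
      (if PySem.List.pyGetD arr j 0 = 1 then
        (if pvWhileA arr N j i j (N.toNat+1) = j + N then some (1:Int) else none)
      else none) = some 1)
      ↔ (∃ j : Int, (0 ≤ j ∧ j < N) ∧ PySem.List.pyGetD arr j 0 = 1 ∧
          ((∀ k : Nat, j + k * i < j + N → PySem.List.pyGetD arr (PySem.Int.mod (j + k * i) N) 0 = 1) ∧
           (∃ m : Nat, j + m * i = j + N))) := by
    apply exists_congr; intro j
    rw [PySem.List.mem_pyRange_one]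
    have hchar := pvWhileA_char arr N j i hi1 (N.toNat+1) j (by omega)
    constructor
    · rintro ⟨hj, hbody⟩
      refine ⟨hj, ?_⟩
      split_ifs at hbody with h1 h2
      exact ⟨h1, hchar.mp h2⟩
    · rintro ⟨hj, h1, hw⟩
      exact ⟨hj, by rw [if_pos h1, if_pos (hchar.mpr hw)]⟩
  rw [hA, pvKey arr N i hN hlen hi1 hi3]
  by_cases hmod : PySem.Int.mod N i = 0
  · rw [if_pos hmod]
    have hvalB : ∀ r ∈ PySem.List.pyRange 0 i 1,
        ((if pvAllOnesB arr N i r then some (1:Int) else none) = none ∨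
        (if pvAllOnesB arr N i r then some (1:Int) else none) = some 1) := by
      intro r _; split_ifs <;> simp
    rw [pvFindSome_some_one _ _ hvalB]
    simp only [hmod, true_and, PySem.List.mem_pyRange_one]
    apply exists_congr; intro r
    constructor
    · rintro ⟨hr, hones⟩; exact ⟨hr, by rw [if_pos hones]⟩
    · rintro ⟨hr, hbody⟩
      refine ⟨hr, ?_⟩
      by_cases hones : pvAllOnesB arr N i r
      · exact hones
      · exact absurd hbody (by rw [if_neg hones]; simp)
  · rw [if_neg hmod]
    simp [hmod]

-- ===== VERDICT (by name: the statement is the Claim_ definition above) =====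
theorem isPolygonPossible_spec : Claim_equal_isPolygonPossible := by
  intro arr N _ hpre
  unfold Spec_isPolygonPossible isPolygonPossible isPolygonPossible_alt
  by_cases h3 : N < 3
  · rw [if_pos h3, if_pos h3]
  · rw [if_neg h3, if_neg h3]
    have hN : 3 ≤ N := by omega
    have hlen : N ≤ (arr.length : Int) := by
      rcases hpre with h | h
      · omega
      · exact h
    have hmain : (PySem.List.pyRange 1 (PySem.Int.floordiv N 3 + 1) 1).findSome? (fun i =>
        (PySem.List.pyRange 0 N 1).findSome? (fun j =>
          if PySem.List.pyGetD arr j 0 = 1 then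
            (if pvWhileA arr N j i j (N.toNat+1) = j + N then some (1:Int) else none)
          else none))
        = (PySem.List.pyRange 1 (PySem.Int.floordiv N 3 + 1) 1).findSome? (fun i =>
        if PySem.Int.mod N i = 0 then
          (PySem.List.pyRange 0 i 1).findSome? (fun r =>
            if pvAllOnesB arr N i r then some (1:Int) else none)
        else none) := by
      apply pvFindSome_congr
      · intro i _
        apply pvFindSome_vals
        intro j _; split_ifs <;> simp
      · intro i _
        by_cases hmod : PySem.Int.mod N i = 0
        · rw [if_pos hmod]
          apply pvFindSome_vals
          intro r _; split_ifs <;> simp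
        · rw [if_neg hmod]; left; rfl
      · intro i hi
        rw [PySem.List.mem_pyRange_one] at hi
        have hi1 : 1 ≤ i := hi.1
        have hi3 : i * 3 ≤ N := by
          have h2 : i ≤ PySem.Int.floordiv N 3 := by omega
          rw [PySem.Int.floordiv_eq_ediv_of_pos (by omega : (0:Int) < 3)] at h2
          exact (Int.le_ediv_iff_mul_le (by omega)).mp h2
        exact pvPerI arr N i hN hlen hi1 hi3
    rw [hmain]
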